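-- pv_equiv track=rewrite | github.com/misskarriew/Dehashed-Columns | dehashed_excerpt.py | choose_col
-- ===== SOURCE A (Python) =====
-- ALIASES = {
--     "email": {"email", "email_address", "e-mail", "mail", "addr", "address_email"},
--     "name": {"name", "full_name", "fullname", "display_name"},
--     "first": {"first_name", "firstname", "given_name", "givenname", "first"},
--     "last": {"last_name", "lastname", "surname", "family_name", "familyname", "last"},
--     "breach": {"breach", "source", "database", "breach_name"},
-- }
--
-- def choose_col(header_lower, prefer: str, explicit: str | None) -> int | None:
--     if not header_lower:
--         return None
--     if explicit:
--         preferred = explicit.lower()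
--         for i, h in enumerate(header_lower):
--             if h == preferred:
--                 return i
--         for i, h in enumerate(header_lower):
--             if preferred in h:
--                 return i
--     aliases = ALIASES.get(prefer, set())
--     for i, h in enumerate(header_lower):
--         if h in aliases:
--             return i
--     return None
-- ===== SOURCE B (Python) =====
-- ALIASES = {
--     "email": {"email", "email_address", "e-mail", "mail", "addr", "address_email"},
--     "name": {"name", "full_name", "fullname", "display_name"},
--     "first": {"first_name", "firstname", "given_name", "givenname", "first"},
--     "last": {"last_name", "lastname", "surname", "family_name", "familyname", "last"},
--     "breach": {"breach", "source", "database", "breach_name"},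
-- }
--
-- def choose_col(header_lower, prefer: str, explicit: str | None) -> int | None:
--     if not header_lower:
--         return None
--     preferred = explicit.lower() if explicit else None
--     aliases = ALIASES.get(prefer, set())
--     best_tier = None
--     best_index = None
--     for i, h in enumerate(header_lower):
--         if preferred is not None and h == preferred:
--             tier = 0
--         elif preferred is not None and preferred in h:
--             tier = 1
--         elif h in aliases:
--             tier = 2
--         else:
--             continue
--         if best_tier is None or tier < best_tier:
--             best_tier, best_index = tier, i
--     return best_index
-- ===== Notes on version B (the rewrite author's own statement) =====
-- stated objective: alternative
-- what changed: Replaced A's three sequential full scans (exact match, substring match, alias match) by a single pass that tracks the best tier seen so far (0=exact, 1=substring, 2=alias) and updates only on a strictly smaller tier, so one traversal yields the same winning index.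
import Mathlib
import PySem

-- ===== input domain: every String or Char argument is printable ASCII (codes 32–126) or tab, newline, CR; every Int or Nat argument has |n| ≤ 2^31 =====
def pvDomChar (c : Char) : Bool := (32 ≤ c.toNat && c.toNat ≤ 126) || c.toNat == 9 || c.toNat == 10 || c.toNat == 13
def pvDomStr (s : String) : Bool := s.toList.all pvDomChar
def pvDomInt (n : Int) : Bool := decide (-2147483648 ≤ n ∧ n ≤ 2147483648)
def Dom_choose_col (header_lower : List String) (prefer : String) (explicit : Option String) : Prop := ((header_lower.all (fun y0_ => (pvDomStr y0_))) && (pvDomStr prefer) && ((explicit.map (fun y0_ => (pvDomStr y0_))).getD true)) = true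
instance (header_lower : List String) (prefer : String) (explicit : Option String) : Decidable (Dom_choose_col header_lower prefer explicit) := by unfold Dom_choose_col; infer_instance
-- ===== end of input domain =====

-- B replaces A's three sequential scans by a single tier-tracking pass; objective: alternative.

-- ===== PORT A =====
-- module constant ALIASES, used by both Pythons (only membership is observed)
def pvAliases (prefer : String) : List String :=
  if prefer = "email" then PySem.Set.ofList ["email", "email_address", "e-mail", "mail", "addr", "address_email"]
  else if prefer = "name" then PySem.Set.ofList ["name", "full_name", "fullname", "display_name"]
  else if prefer = "first" then PySem.Set.ofList ["first_name", "firstname", "given_name", "givenname", "first"]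
  else if prefer = "last" then PySem.Set.ofList ["last_name", "lastname", "surname", "family_name", "familyname", "last"]
  else if prefer = "breach" then PySem.Set.ofList ["breach", "source", "database", "breach_name"]
  else PySem.Set.empty

-- A's first loop: first i with h == preferred
def scanEq (p : String) : List (Int × String) → Option Int
  | [] => none
  | (i, h) :: t => if h = p then some i else scanEq p t

-- A's second loop: first i with preferred in h
def scanSub (p : String) : List (Int × String) → Option Int
  | [] => none
  | (i, h) :: t => if PySem.Str.isIn p h then some i else scanSub p t

-- A's third loop: first i with h in aliases
def scanAlias (al : List String) : List (Int × String) → Option Int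
  | [] => none
  | (i, h) :: t => if PySem.Set.contains al h then some i else scanAlias al t

def choose_col (header_lower : List String) (prefer : String) (explicit : Option String) : Option Int :=
  if header_lower = [] then none
  else
    let en := PySem.List.enumerate header_lower
    match explicit with
    | some e =>
      if e ≠ "" then
        let preferred := PySem.Str.lower e
        match scanEq preferred en with
        | some i => some i
        | none =>
          match scanSub preferred en with
          | some i => some i
          | none => scanAlias (pvAliases prefer) en
      else scanAlias (pvAliases prefer) en
    | none => scanAlias (pvAliases prefer) en

-- ===== PORT B =====
-- the tier of one header cell: 0 exact, 1 substring, 2 alias, none = skip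
def altTier? (pref? : Option String) (al : List String) (h : String) : Option Int :=
  match pref? with
  | some p =>
    if h = p then some 0
    else if PySem.Str.isIn p h then some 1
    else if PySem.Set.contains al h then some 2
    else none
  | none => if PySem.Set.contains al h then some 2 else none

-- B's single pass: update best only on a strictly smaller tier
def altLoop (pref? : Option String) (al : List String) :
    List (Int × String) → Option Int → Option Int → Option Int
  | [], _, best => best
  | (i, h) :: t, bt, best =>
    match altTier? pref? al h with
    | none => altLoop pref? al t bt best
    | some tier =>
      match bt with
      | none => altLoop pref? al t (some tier) (some i)
      | some b =>
        if tier < b then altLoop pref? al t (some tier) (some i)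
        else altLoop pref? al t bt best

def choose_col_alt (header_lower : List String) (prefer : String) (explicit : Option String) : Option Int :=
  if header_lower = [] then none
  else
    let pref? : Option String :=
      match explicit with
      | some e => if e ≠ "" then some (PySem.Str.lower e) else none
      | none => none
    altLoop pref? (pvAliases prefer) (PySem.List.enumerate header_lower) none none

-- ===== PRECONDITION & SPEC =====
def Spec_choose_col (header_lower : List String) (prefer : String) (explicit : Option String) (out : Option Int) : Prop := out = choose_col_alt header_lower prefer explicit
instance (header_lower : List String) (prefer : String) (explicit : Option String) (out : Option Int) : Decidable (Spec_choose_col header_lower prefer explicit out) := by unfold Spec_choose_col; infer_instance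

-- ===== CLAIM (what is proved, stated in full; the proofs are below) =====
def Claim_equal_choose_col : Prop := ∀ (header_lower : List String) (prefer : String) (explicit : Option String), Dom_choose_col header_lower prefer explicit → Spec_choose_col header_lower prefer explicit (choose_col header_lower prefer explicit)

-- ===== LEMMAS AND PROOFS =====

-- the tier of a cell is always 0, 1 or 2
theorem altTier?_mem (pref? : Option String) (al : List String) (h : String) (t : Int)
    (ht : altTier? pref? al h = some t) : t = 0 ∨ t = 1 ∨ t = 2 := by
  rcases pref? with _ | p <;> simp only [altTier?] at ht <;> split_ifs at ht <;>
    simp_all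

-- h = p makes p a substring of h
theorem isIn_self (p : List Char) : PySem.Chars.isIn p p = true := by
  rw [PySem.Chars.isIn_iff_infix]

-- with best tier 0, nothing can improve
theorem altLoop_zero (pref? : Option String) (al : List String) (l : List (Int × String)) (best : Option Int) :
    altLoop pref? al l (some 0) best = best := by
  induction l generalizing best with
  | nil => rfl
  | cons hd t ih =>
    obtain ⟨i, h⟩ := hd
    cases ht : altTier? pref? al h with
    | none => simp [altLoop, ht, ih]
    | some tier =>
      rcases altTier?_mem pref? al h tier ht with h0 | h1 | h2 <;>
        subst_vars <;> simp [altLoop, ht, ih]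

-- pref? = none, best tier already 2: nothing improves
theorem altLoop_none_two (al : List String) (l : List (Int × String)) (best : Option Int) :
    altLoop none al l (some 2) best = best := by
  induction l generalizing best with
  | nil => rfl
  | cons hd t ih =>
    obtain ⟨i, h⟩ := hd
    by_cases hc : h ∈ al <;>
      simp [altLoop, altTier?, hc, ih]

-- pref? = none, fresh state: B is A's alias scan
theorem altLoop_none_spec (al : List String) (l : List (Int × String)) (best : Option Int) :
    altLoop none al l none best = (scanAlias al l).or best := by
  induction l generalizing best with
  | nil => rfl
  | cons hd t ih =>
    obtain ⟨i, h⟩ := hd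
    by_cases hc : h ∈ al <;>
      simp [altLoop, altTier?, scanAlias, hc, ih, altLoop_none_two]

-- pref? = some p, best tier 1: only an exact match improves
theorem altLoop_one (p : String) (al : List String) (l : List (Int × String)) (best : Option Int) :
    altLoop (some p) al l (some 1) best = (scanEq p l).or best := by
  induction l generalizing best with
  | nil => rfl
  | cons hd t ih =>
    obtain ⟨i, h⟩ := hd
    by_cases h0 : h = p
    · subst h0
      simp [altLoop, altTier?, scanEq, altLoop_zero]
    · by_cases h1 : PySem.Chars.isIn p.toList h.toList = true <;>
        by_cases h2 : h ∈ al <;>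
          simp [altLoop, altTier?, scanEq, h0, h1, h2, ih]

-- pref? = some p, best tier 2: exact then substring improve
theorem altLoop_two (p : String) (al : List String) (l : List (Int × String)) (best : Option Int) :
    altLoop (some p) al l (some 2) best = (scanEq p l).or ((scanSub p l).or best) := by
  induction l generalizing best with
  | nil => rfl
  | cons hd t ih =>
    obtain ⟨i, h⟩ := hd
    by_cases h0 : h = p
    · subst h0
      simp [altLoop, altTier?, scanEq, scanSub, altLoop_zero, isIn_self]
    · by_cases h1 : PySem.Chars.isIn p.toList h.toList = true
      · simp [altLoop, altTier?, scanEq, scanSub, h0, h1, altLoop_one]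
      · by_cases h2 : h ∈ al <;>
          simp [altLoop, altTier?, scanEq, scanSub, h0, h1, h2, ih]

-- pref? = some p, fresh state: B is A's three scans chained
theorem altLoop_some_spec (p : String) (al : List String) (l : List (Int × String)) (best : Option Int) :
    altLoop (some p) al l none best =
      (scanEq p l).or ((scanSub p l).or ((scanAlias al l).or best)) := by
  induction l generalizing best with
  | nil => rfl
  | cons hd t ih =>
    obtain ⟨i, h⟩ := hd
    by_cases h0 : h = p
    · subst h0
      simp [altLoop, altTier?, scanEq, scanSub, scanAlias, altLoop_zero, isIn_self]
    · by_cases h1 : PySem.Chars.isIn p.toList h.toList = true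
      · simp [altLoop, altTier?, scanEq, scanSub, scanAlias, h0, h1, altLoop_one]
      · by_cases h2 : h ∈ al <;>
          simp [altLoop, altTier?, scanEq, scanSub, scanAlias, h0, h1, h2, ih,
            altLoop_two]

-- ===== VERDICT (by name: the statement is the Claim_ definition above) =====
theorem choose_col_spec : Claim_equal_choose_col := by
  intro hl prefer explicit _
  unfold Spec_choose_col choose_col choose_col_alt
  by_cases hnil : hl = []
  · simp [hnil]
  · simp only [hnil, if_false]
    rcases explicit with _ | e
    · simp [altLoop_none_spec]
    · by_cases he : e = ""
      · simp [he, altLoop_none_spec]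
      · simp only [he, ne_eq, not_false_iff, if_true]
        rw [altLoop_some_spec]
        cases scanEq (PySem.Str.lower e) (PySem.List.enumerate hl) <;>
          cases scanSub (PySem.Str.lower e) (PySem.List.enumerate hl) <;> simp
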